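-- pv_equiv track=rewrite | github.com/kangjunluck/algorithm | 프로그래머스/2018blind/비밀지도.py | solution
-- ===== SOURCE A (Python) =====
-- def solution(n, arr1, arr2):
--     answer = []
--     board = [[' ' for _ in range(n)] for _ in range(n)]
--
--     def makebinary(num):
--         bin = ''
--         while num > 1:
--             bin += str(num % 2)
--             num = num // 2
--         bin += str(num)
--         while len(bin) < n:
--             bin += '0'
--         bin = bin[::-1]
--         return bin
--
--     def fillboard(arr):
--         i = 0
--         for num in arr:
--             bin_num = makebinary(num)
--             for j in range(n):
--                 if bin_num[j]  == '1' and board[i][j] == ' ':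
--                     board[i][j] = '#'
--             i += 1
--     fillboard(arr1)
--     fillboard(arr2)
--     for step in board:
--         answer.append(''.join(step))
--
--     return answer
-- ===== SOURCE B (Python) =====
-- def solution(n, arr1, arr2):
--     a = arr1 + [0] * n          # give every one of the n rows an entry
--     b = arr2 + [0] * n
--     return [''.join('#' if (a[i] | b[i]) >> (n - 1 - j) & 1 else ' ' for j in range(n))
--             for i in range(n)]
-- ===== Notes on version B (the rewrite author's own statement) =====
-- stated objective: simpler
-- what changed: Replaces the mutable n-by-n board, the LSB-first append-pad-reverse string builder and the two cell-by-cell overlay passes with a single comprehension that zero-pads the lists to n rows, ORs the two row numbers and tests each bit by shifting; Pre_ excludes inputs with a negative entry, an entry >= 2^n, or a nonzero entry past row n, where A raises IndexError or returns rows that are accidents of its decimal string building (minus-sign characters, most-significant-bit keeping).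
-- outside the precondition, e.g. on solution(2, [-1, 0], [0, 0]): A returns ['# ', '  '], B returns ['##', '  ']; on solution(1, [2], [0]): A returns ['#'], B returns [' ']; on solution(1, [0, -100], [0]): A returns [' '], B returns [' ']
import Mathlib
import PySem

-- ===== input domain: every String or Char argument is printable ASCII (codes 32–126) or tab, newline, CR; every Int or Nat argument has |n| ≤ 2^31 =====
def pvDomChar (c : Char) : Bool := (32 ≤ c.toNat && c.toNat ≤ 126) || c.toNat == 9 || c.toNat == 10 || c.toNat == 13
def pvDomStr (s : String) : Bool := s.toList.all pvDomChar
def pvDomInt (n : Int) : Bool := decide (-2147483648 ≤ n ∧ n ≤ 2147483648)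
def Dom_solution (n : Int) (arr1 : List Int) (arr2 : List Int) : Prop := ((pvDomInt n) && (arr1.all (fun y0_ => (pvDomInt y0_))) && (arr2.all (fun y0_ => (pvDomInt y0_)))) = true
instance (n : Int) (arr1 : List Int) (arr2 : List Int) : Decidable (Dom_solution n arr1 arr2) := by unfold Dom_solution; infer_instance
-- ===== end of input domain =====

-- B drops A's n×n board, LSB-first string building and two overlay passes for one
-- comprehension that ORs the two row numbers and tests each bit by shifting (objective: simpler).

-- ===== PORT A =====
-- 'while num > 1: bin += str(num % 2); num = num // 2' then 'bin += str(num)', LSB-first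
def pvMakebinLoop (num : Int) : List Char :=
  if h : 1 < num then
    PySem.Int.toChars (PySem.Int.mod num 2) ++ pvMakebinLoop (PySem.Int.floordiv num 2)
  else
    PySem.Int.toChars num
termination_by num.toNat
decreasing_by
  rw [PySem.Int.floordiv_eq_ediv_of_pos (by omega : (0:Int) < 2)]
  omega

-- 'while len(bin) < n: bin += "0"'
def pvPadLoop (n : Int) (bin : List Char) : List Char :=
  if h : (bin.length : Int) < n then pvPadLoop n (bin ++ ['0']) else bin
termination_by (n - bin.length).toNat
decreasing_by
  simp only [List.length_append, List.length_cons, List.length_nil]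
  omega

def pvMakebinary (n : Int) (num : Int) : List Char :=
  (pvPadLoop n (pvMakebinLoop num)).reverse            -- 'bin = bin[::-1]'

-- inner 'for j in range(n)': bin_num[j] / board[i][j] port as getD (in range whenever the
-- Python reaches them without raising; inputs on which Python raises are outside Pre_)
def pvFillRow (n : Int) (binc : List Char) (row : List Char) : List Char :=
  (List.range n.toNat).foldl
    (fun r j => if binc.getD j ' ' = '1' ∧ r.getD j ' ' = ' ' then r.set j '#' else r) row

-- 'def fillboard(arr): i = 0; for num in arr: …; i += 1' mutating board row i
def pvFillboard (n : Int) (arr : List Int) (board : List (List Char)) (i : Nat) : List (List Char) :=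
  match arr with
  | [] => board
  | num :: rest => pvFillboard n rest (board.modify i (pvFillRow n (pvMakebinary n num))) (i + 1)

def solution (n : Int) (arr1 : List Int) (arr2 : List Int) : List String :=
  let board := (List.range n.toNat).map (fun _ => (List.range n.toNat).map (fun _ => ' '))
  let board1 := pvFillboard n arr1 board 0
  let board2 := pvFillboard n arr2 board1 0
  board2.map (fun step => String.ofList step)          -- answer.append(''.join(step))

-- ===== PORT B =====
-- 'a = arr1 + [0] * n' ([0]*n is [] for n ≤ 0, so replicate n.toNat is exact), then per row
-- "'#' if (a[i] | b[i]) >> (n - 1 - j) & 1 else ' '"; a[i]/b[i] ported as getD: i < n ≤ len(a)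
-- always, so the read is in range, and the shift amount n - 1 - j is nonnegative for every j
-- produced by range(n), so '.toNat' is exact (the negative cases Python raises on are never reached)
def solution_alt (n : Int) (arr1 : List Int) (arr2 : List Int) : List String :=
  let a := arr1 ++ List.replicate n.toNat 0
  let b := arr2 ++ List.replicate n.toNat 0
  (List.range n.toNat).map (fun (i : Nat) =>
    String.ofList ((List.range n.toNat).map (fun (j : Nat) =>
      if Int.land (Int.shiftRight (Int.lor (a.getD i 0) (b.getD i 0)) (n - 1 - (j : Int)).toNat) 1 ≠ 0
      then '#' else ' ')))

-- ===== PRECONDITION & SPEC =====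
-- Pre_ keeps every input with n ≤ 0 (A returns [] there) and, for n > 0, the inputs whose
-- entries are n-bit naturals with any entries past row n zero; it excludes inputs with a
-- negative entry, an entry ≥ 2^n, or a nonzero entry past row n, on which A either raises
-- IndexError at board[i] or returns rows that are accidents of its decimal string building
-- (minus-sign characters, most-significant-bit keeping) — see the excluded examples in claim.json.
def Pre_solution (n : Int) (arr1 : List Int) (arr2 : List Int) : Prop :=
  n ≤ 0 ∨ ((∀ x ∈ arr1, 0 ≤ x ∧ x < 2 ^ n.toNat) ∧ (∀ x ∈ arr2, 0 ≤ x ∧ x < 2 ^ n.toNat) ∧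
    (∀ x ∈ arr1.drop n.toNat, x = 0) ∧ (∀ x ∈ arr2.drop n.toNat, x = 0))
instance (n : Int) (arr1 : List Int) (arr2 : List Int) : Decidable (Pre_solution n arr1 arr2) := by
  unfold Pre_solution; infer_instance

def pvWitness_solution : Int × List Int × List Int := (3, [5, 1, 2], [2, 4, 3])

def Spec_solution (n : Int) (arr1 : List Int) (arr2 : List Int) (out : List String) : Prop := out = solution_alt n arr1 arr2
instance (n : Int) (arr1 : List Int) (arr2 : List Int) (out : List String) : Decidable (Spec_solution n arr1 arr2 out) := by unfold Spec_solution; infer_instance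

-- ===== CLAIM (what is proved, stated in full; the proofs are below) =====
def Claim_equal_solution : Prop := ∀ (n : Int) (arr1 : List Int) (arr2 : List Int), Dom_solution n arr1 arr2 → Pre_solution n arr1 arr2 → Spec_solution n arr1 arr2 (solution n arr1 arr2)

-- ===== LEMMAS AND PROOFS =====

-- LSB-first binary digit list of a natural number, A's makebinary loop restricted to ℕ
def binCharsNat (m : Nat) : List Char :=
  if h : m ≤ 1 then [if m = 1 then '1' else '0']
  else (if m % 2 = 1 then '1' else '0') :: binCharsNat (m / 2)
termination_by m
decreasing_by omega

lemma pvMakebinLoop_eq (num : Int) (h0 : 0 ≤ num) :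
    pvMakebinLoop num = binCharsNat num.toNat := by
  fun_induction pvMakebinLoop with
  | case1 num h ih =>
    have h2 : PySem.Int.floordiv num 2 = num / 2 :=
      PySem.Int.floordiv_eq_ediv_of_pos (by omega)
    have hmod : PySem.Int.mod num 2 = num % 2 :=
      PySem.Int.mod_eq_emod_of_pos (by omega)
    have hd : (PySem.Int.floordiv num 2).toNat = num.toNat / 2 := by omega
    rw [binCharsNat, dif_neg (by omega : ¬ num.toNat ≤ 1), ih (by omega), hd]
    have hch : PySem.Int.toChars (PySem.Int.mod num 2)
        = [if num.toNat % 2 = 1 then '1' else '0'] := by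
      by_cases hp : num % 2 = 1
      · have e1 : PySem.Int.mod num 2 = 1 := by omega
        have e2 : num.toNat % 2 = 1 := by omega
        rw [e1, e2]
        decide
      · have e1 : PySem.Int.mod num 2 = 0 := by omega
        have e2 : num.toNat % 2 = 0 := by omega
        rw [e1, e2]
        decide
    rw [hch]
    rfl
  | case2 num h =>
    have h01 : num = 0 ∨ num = 1 := by omega
    rcases h01 with h' | h' <;> subst h' <;> rw [binCharsNat] <;> decide

lemma binCharsNat_getD (m k : Nat) :
    (binCharsNat m).getD k '0' = if m.testBit k then '1' else '0' := by
  fun_induction binCharsNat generalizing k with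
  | case1 m h =>
    have h01 : m = 0 ∨ m = 1 := by omega
    match k with
    | 0 => rcases h01 with h' | h' <;> subst h' <;> simp
    | k + 1 =>
      have ht : m.testBit (k + 1) = false := by
        rcases h01 with h' | h' <;> subst h' <;> simp [Nat.testBit_succ]
      simp [List.getD, ht]
  | case2 m h ih =>
    match k with
    | 0 =>
      simp only [List.getD_cons_zero, Nat.testBit_zero]
      by_cases hm : m % 2 = 1 <;> simp [hm]
    | k + 1 =>
      simp only [List.getD_cons_succ, ih, Nat.testBit_succ]

lemma binCharsNat_length_le (m L : Nat) (hL : 1 ≤ L) (hm : m < 2 ^ L) :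
    (binCharsNat m).length ≤ L := by
  fun_induction binCharsNat generalizing L with
  | case1 m h => simpa using hL
  | case2 m h ih =>
    match L, hL with
    | 1, _ =>
      exfalso
      have : m < 2 := by simpa using hm
      omega
    | L + 1, _ =>
      have hL1 : 1 ≤ L := by
        by_contra hc
        have hz : L = 0 := by omega
        subst hz
        have : m < 2 := by simpa using hm
        omega
      have hdiv : m / 2 < 2 ^ L := by
        rw [pow_succ] at hm
        omega
      simpa using Nat.add_le_add_right (ih L hL1 hdiv) 1

lemma pvPadLoop_eq (n : Int) (bin : List Char) :
    pvPadLoop n bin = bin ++ List.replicate (n.toNat - bin.length) '0' := by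
  fun_induction pvPadLoop with
  | case1 bin h ih =>
    rw [ih]
    have : n.toNat - bin.length = (n.toNat - (bin ++ ['0']).length) + 1 := by
      simp only [List.length_append, List.length_cons, List.length_nil]
      omega
    rw [this, List.replicate_succ]
    simp
  | case2 bin h =>
    have : n.toNat - bin.length = 0 := by omega
    simp [this]

-- the j-th character of A's painted string is bit (n-1-j) of the number
lemma pvMakebinary_getD (n num : Int) (j : Nat) (hj : j < n.toNat)
    (h0 : 0 ≤ num) (hlt : num < 2 ^ n.toNat) :
    (pvMakebinary n num).getD j ' ' =
      if num.toNat.testBit (n.toNat - 1 - j) then '1' else '0' := by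
  have hn1 : 1 ≤ n.toNat := by omega
  have hmlt : num.toNat < 2 ^ n.toNat := by
    have : ((num.toNat : Int)) < ((2 ^ n.toNat : Nat) : Int) := by push_cast; omega
    exact_mod_cast this
  have hlen : (binCharsNat num.toNat).length ≤ n.toNat :=
    binCharsNat_length_le _ _ hn1 hmlt
  unfold pvMakebinary
  rw [pvPadLoop_eq, pvMakebinLoop_eq num h0]
  set bc := binCharsNat num.toNat with hbc
  set padded := bc ++ List.replicate (n.toNat - bc.length) '0' with hpad
  have hplen : padded.length = n.toNat := by
    simp only [hpad, List.length_append, List.length_replicate]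
    omega
  have hjlen : j < padded.reverse.length := by simp [hplen]; omega
  rw [List.getD_eq_getElem _ _ hjlen, List.getElem_reverse]
  have hidx : padded.length - 1 - j = n.toNat - 1 - j := by omega
  set k := n.toNat - 1 - j with hk
  have hkp : k < padded.length := by omega
  have : padded[padded.length - 1 - j]'(by omega) = padded.getD k '0' := by
    rw [List.getD_eq_getElem _ _ (by omega)]
    congr 1
  rw [this]
  have hgd : padded.getD k '0' = bc.getD k '0' := by
    by_cases hkb : k < bc.length
    · rw [hpad, List.getD_eq_getElem _ _ hkp, List.getD_eq_getElem _ _ hkb,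
        List.getElem_append_left hkb]
    · rw [hpad, List.getD_eq_getElem _ _ hkp, List.getElem_append_right (by omega),
        List.getElem_replicate, List.getD_eq_default _ _ (by omega)]
  rw [hgd, hbc, binCharsNat_getD]

-- B's cell test is the same bit
lemma cellB_eq (x y : Nat) (k : Nat) :
    (Int.land (Int.shiftRight (Int.lor (x : Int) (y : Int)) k) 1 ≠ 0) ↔
      (x ||| y).testBit k := by
  have h1 : Int.lor (x : Int) (y : Int) = ((x ||| y : Nat) : Int) := rfl
  have h2 : Int.shiftRight (((x ||| y : Nat)) : Int) k = (((x ||| y) >>> k : Nat) : Int) := rfl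
  have h3 : Int.land ((((x ||| y) >>> k : Nat)) : Int) 1
      = ((((x ||| y) >>> k) &&& 1 : Nat) : Int) := rfl
  rw [h1, h2, h3]
  have e : ((x ||| y) >>> k) &&& 1 = (x ||| y) / 2 ^ k % 2 := by
    rw [Nat.and_one_is_mod, Nat.shiftRight_eq_div_pow]
  rw [e]
  simp only [ne_eq, Int.natCast_eq_zero, Nat.testBit_eq_decide_div_mod_eq, decide_eq_true_eq]
  omega


lemma pvFillRow_aux_length (binc : List Char) (l : List Nat) (row : List Char) :
    (l.foldl (fun r j => if binc.getD j ' ' = '1' ∧ r.getD j ' ' = ' ' then r.set j '#' else r)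
      row).length = row.length := by
  induction l generalizing row with
  | nil => rfl
  | cons a l ih =>
    simp only [List.foldl_cons]
    split
    · rw [ih, List.length_set]
    · rw [ih]

lemma pvFillRow_length (n : Int) (binc row : List Char) :
    (pvFillRow n binc row).length = row.length := pvFillRow_aux_length _ _ _

lemma pvFillRow_aux_getD (binc : List Char) (k : Nat) (row : List Char) (j : Nat)
    (hj : j < row.length) :
    ((List.range k).foldl (fun r j => if binc.getD j ' ' = '1' ∧ r.getD j ' ' = ' ' then r.set j '#' else r) row).getD j ' '
      = if j < k ∧ binc.getD j ' ' = '1' ∧ row.getD j ' ' = ' ' then '#' else row.getD j ' ' := by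
  induction k with
  | zero => simp
  | succ k ih =>
    rw [List.range_succ, List.foldl_append]
    simp only [List.foldl_cons, List.foldl_nil]
    set prev := (List.range k).foldl
      (fun r j => if binc.getD j ' ' = '1' ∧ r.getD j ' ' = ' ' then r.set j '#' else r) row
      with hprev
    have hplen : prev.length = row.length := pvFillRow_aux_length _ _ _
    have hpj : prev.getD j ' '
        = if j < k ∧ binc.getD j ' ' = '1' ∧ row.getD j ' ' = ' ' then '#' else row.getD j ' ' :=
      ih
    by_cases hc : binc.getD k ' ' = '1' ∧ prev.getD k ' ' = ' '
    · rw [if_pos hc]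
      by_cases hjk : j = k
      · subst hjk
        have hjlen : j < (prev.set j '#').length := by simp [hplen]; omega
        rw [List.getD_eq_getElem _ _ hjlen, List.getElem_set_self]
        have hrowj : row.getD j ' ' = ' ' := by
          have := hpj
          rw [hc.2] at this
          by_cases hx : j < j ∧ binc.getD j ' ' = '1' ∧ row.getD j ' ' = ' '
          · exact hx.2.2
          · rw [if_neg hx] at this; exact this.symm
        rw [if_pos ⟨by omega, hc.1, hrowj⟩]
      · have hne : (prev.set k '#').getD j ' ' = prev.getD j ' ' := by
          simp [List.getD, List.getElem?_set_ne (fun h => hjk h.symm)]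
        rw [hne, hpj]
        have hiff : (j < k + 1 ∧ binc.getD j ' ' = '1' ∧ row.getD j ' ' = ' ')
            ↔ (j < k ∧ binc.getD j ' ' = '1' ∧ row.getD j ' ' = ' ') := by
          constructor
          · rintro ⟨h1, h2, h3⟩; exact ⟨by omega, h2, h3⟩
          · rintro ⟨h1, h2, h3⟩; exact ⟨by omega, h2, h3⟩
        rw [if_congr hiff rfl rfl]
    · rw [if_neg hc, hpj]
      by_cases hjk : j = k
      · subst hjk
        have hnotk : ¬ (j < j ∧ binc.getD j ' ' = '1' ∧ row.getD j ' ' = ' ') := by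
          intro h; omega
        rw [if_neg hnotk]
        rw [if_neg hnotk] at hpj
        have : ¬ (j < j + 1 ∧ binc.getD j ' ' = '1' ∧ row.getD j ' ' = ' ') := by
          intro h
          exact hc ⟨h.2.1, by rw [hpj]; exact h.2.2⟩
        rw [if_neg this]
      · have hiff : (j < k + 1 ∧ binc.getD j ' ' = '1' ∧ row.getD j ' ' = ' ')
            ↔ (j < k ∧ binc.getD j ' ' = '1' ∧ row.getD j ' ' = ' ') := by
          constructor
          · rintro ⟨h1, h2, h3⟩; exact ⟨by omega, h2, h3⟩
          · rintro ⟨h1, h2, h3⟩; exact ⟨by omega, h2, h3⟩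
        rw [if_congr hiff rfl rfl]

lemma pvFillRow_getD (n : Int) (binc row : List Char) (j : Nat) (hj : j < row.length) :
    (pvFillRow n binc row).getD j ' '
      = if j < n.toNat ∧ binc.getD j ' ' = '1' ∧ row.getD j ' ' = ' ' then '#' else row.getD j ' ' :=
  pvFillRow_aux_getD binc n.toNat row j hj

lemma modify_append_cons {α : Type} (b1 : List α) (x : α) (b2 : List α) (f : α → α) :
    (b1 ++ x :: b2).modify b1.length f = b1 ++ f x :: b2 := by
  induction b1 with
  | nil => simp [List.modify]
  | cons a b1 ih => simpa [List.modify] using ih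

lemma pvFillboard_ge (n : Int) (arr : List Int) (board : List (List Char)) (i : Nat)
    (h : board.length ≤ i) : pvFillboard n arr board i = board := by
  induction arr generalizing board i with
  | nil => rfl
  | cons num rest ih =>
    rw [pvFillboard, List.modify_eq_self h, ih _ _ (by omega)]

lemma pvFillboard_go (n : Int) (arr : List Int) :
    ∀ (b1 b2 : List (List Char)),
    pvFillboard n arr (b1 ++ b2) b1.length
      = b1 ++ (List.zipWith (fun num row => pvFillRow n (pvMakebinary n num) row) arr b2
          ++ b2.drop arr.length) := by
  induction arr with
  | nil =>
    intro b1 b2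
    simp [pvFillboard]
  | cons num rest ih =>
    intro b1 b2
    match b2 with
    | [] =>
      rw [pvFillboard, List.modify_eq_self (by simp),
        pvFillboard_ge n rest _ _ (by simp)]
      simp
    | row :: b2' =>
      have := ih (b1 ++ [pvFillRow n (pvMakebinary n num) row]) b2'
      simp only [pvFillboard, modify_append_cons]
      simpa using this

lemma pvFillboard_eq (n : Int) (arr : List Int) (board : List (List Char)) :
    pvFillboard n arr board 0
      = List.zipWith (fun num row => pvFillRow n (pvMakebinary n num) row) arr board
        ++ board.drop arr.length := by
  simpa using pvFillboard_go n arr [] board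

lemma getD_append_replicate (l : List Int) (i : Nat) (N : Nat) :
    (l ++ List.replicate N 0).getD i 0 = l.getD i 0 := by
  rcases lt_or_ge i l.length with h | h
  · rw [List.getD_eq_getElem _ _ (by rw [List.length_append, List.length_replicate]; omega),
      List.getD_eq_getElem _ _ h, List.getElem_append_left h]
  · rw [List.getD_eq_default l _ (by omega)]
    rcases lt_or_ge i (l ++ List.replicate N 0).length with h2 | h2
    · rw [List.getD_eq_getElem _ _ h2, List.getElem_append_right h]
      simp
    · rw [List.getD_eq_default _ _ (by omega)]

-- ===== VERDICT (by name: the statement is the Claim_ definition above) =====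
theorem solution_spec : Claim_equal_solution := by
  intro n arr1 arr2 _ hpre
  set N := n.toNat with hNdef
  unfold Spec_solution solution solution_alt
  dsimp only
  by_cases hn0 : N = 0
  · simp only [← hNdef, hn0, List.range_zero, List.map_nil]
    rw [pvFillboard_ge n arr1 _ 0 (by simp), pvFillboard_ge n arr2 _ 0 (by simp)]
    simp
  rcases hpre with h | ⟨hbnd1, hbnd2, hdrop1, hdrop2⟩
  · omega
  simp only [← hNdef]
  set row0 : List Char := (List.range N).map (fun _ => ' ') with hrow0
  have hrow0len : row0.length = N := by simp [hrow0]
  have hrow0get : ∀ (j : Nat), row0.getD j ' ' = ' ' := by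
    intro j
    by_cases hj : j < N
    · rw [List.getD_eq_getElem _ _ (by omega)]; simp [hrow0]
    · exact List.getD_eq_default _ _ (by omega)
  set board0 : List (List Char) := (List.range N).map (fun _ => row0) with hboard0
  have hb0len : board0.length = N := by simp [hboard0]
  have hb0get : ∀ (k : Nat) (hk : k < board0.length), board0[k] = row0 := by
    intro k hk; simp [hboard0]
  rw [pvFillboard_eq n arr1 board0]
  set board1 := List.zipWith (fun num row => pvFillRow n (pvMakebinary n num) row) arr1 board0
      ++ board0.drop arr1.length with hboard1
  have hb1len : board1.length = N := by
    rw [hboard1]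
    simp only [List.length_append, List.length_zipWith, List.length_drop, hb0len]
    omega
  have hb1get : ∀ (i : Nat) (hi : i < N),
      board1[i]'(by omega)
        = if i < arr1.length then pvFillRow n (pvMakebinary n arr1[i]!) row0 else row0 := by
    intro i hi
    simp only [hboard1]
    by_cases hi1 : i < arr1.length
    · rw [List.getElem_append_left (by simp [List.length_zipWith, hb0len]; omega),
        List.getElem_zipWith]
      rw [hb0get i (by omega), if_pos hi1]
      congr 1
      rw [List.getElem!_eq_getElem?_getD, List.getElem?_eq_getElem hi1]
      rfl
    · rw [List.getElem_append_right (by simp [List.length_zipWith, hb0len]; omega)]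
      rw [if_neg hi1]
      simp only [List.getElem_drop]
      rw [hb0get _ (by simp only [List.length_zipWith, hb0len] at *; omega)]
  have hb1row_len : ∀ (i : Nat) (hi : i < N), (board1[i]'(by omega)).length = N := by
    intro i hi
    rw [hb1get i hi]
    by_cases hi1 : i < arr1.length
    · rw [if_pos hi1, pvFillRow_length, hrow0len]
    · rw [if_neg hi1, hrow0len]
  rw [pvFillboard_eq n arr2 board1]
  apply List.ext_getElem
  · simp only [List.length_map, List.length_append, List.length_zipWith, List.length_drop,
      List.length_range, hb1len]
    omega
  intro i hiA hiB
  have hiN : i < N := by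
    simp only [List.length_map, List.length_range] at hiB
    omega
  simp only [List.getElem_map, List.getElem_range]
  -- A's row i of the final board
  have hb2get : (List.zipWith (fun num row => pvFillRow n (pvMakebinary n num) row) arr2 board1
        ++ board1.drop arr2.length)[i]'(by
          simp only [List.length_append, List.length_zipWith, List.length_drop, hb1len]; omega)
      = if i < arr2.length then pvFillRow n (pvMakebinary n arr2[i]!) (board1[i]'(by omega))
        else board1[i]'(by omega) := by
    by_cases hi2 : i < arr2.length
    · rw [List.getElem_append_left (by simp [List.length_zipWith, hb1len]; omega),
        List.getElem_zipWith]
      rw [if_pos hi2]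
      congr 1
      · rw [List.getElem!_eq_getElem?_getD, List.getElem?_eq_getElem hi2]
        rfl
    · rw [List.getElem_append_right (by simp [List.length_zipWith, hb1len]; omega)]
      rw [if_neg hi2]
      simp only [List.getElem_drop, List.length_zipWith, hb1len]
      have hidx : arr2.length + (i - min arr2.length N) = i := by omega
      simp only [hidx]
  rw [hb2get]
  have hrowlen' : (if i < arr2.length
      then pvFillRow n (pvMakebinary n arr2[i]!) (board1[i]'(by omega))
      else board1[i]'(by omega)).length = N := by
    by_cases hi2 : i < arr2.length
    · rw [if_pos hi2, pvFillRow_length, hb1row_len i hiN]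
    · rw [if_neg hi2, hb1row_len i hiN]
  -- the per-character value of A's row
  have hsharp : ¬ ('#' : Char) = ' ' := by decide
  have hinner : ∀ (j : Nat), j < N → (board1[i]'(by omega)).getD j ' '
      = if i < arr1.length ∧ (pvMakebinary n arr1[i]!).getD j ' ' = '1' then '#' else ' ' := by
    intro j hjN
    rw [hb1get i hiN]
    by_cases hi1 : i < arr1.length
    · rw [if_pos hi1, pvFillRow_getD n _ _ j (by omega), hrow0get j]
      by_cases hm1 : (pvMakebinary n arr1[i]!).getD j ' ' = '1'
      · rw [if_pos ⟨show j < n.toNat from hjN, hm1, rfl⟩, if_pos ⟨hi1, hm1⟩]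
      · rw [if_neg (by intro h; exact hm1 h.2.1), if_neg (by intro h; exact hm1 h.2)]
    · rw [if_neg hi1, hrow0get j, if_neg (by intro h; exact hi1 h.1)]
  have hcell : ∀ (j : Nat), j < N → (if i < arr2.length
      then pvFillRow n (pvMakebinary n arr2[i]!) (board1[i]'(by omega))
      else board1[i]'(by omega)).getD j ' '
      = if (i < arr1.length ∧ (pvMakebinary n arr1[i]!).getD j ' ' = '1')
          ∨ (i < arr2.length ∧ (pvMakebinary n arr2[i]!).getD j ' ' = '1')
        then '#' else ' ' := by
    intro j hjN
    by_cases hi2 : i < arr2.length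
    · rw [if_pos hi2, pvFillRow_getD n _ _ j (by rw [hb1row_len i hiN]; omega), hinner j hjN]
      by_cases hA : i < arr1.length ∧ (pvMakebinary n arr1[i]!).getD j ' ' = '1'
      · rw [if_pos hA, if_neg (by intro h; exact hsharp h.2.2), if_pos (Or.inl hA)]
      · rw [if_neg hA]
        by_cases hm2 : (pvMakebinary n arr2[i]!).getD j ' ' = '1'
        · rw [if_pos ⟨show j < n.toNat from hjN, hm2, rfl⟩, if_pos (Or.inr ⟨hi2, hm2⟩)]
        · rw [if_neg (by intro h; exact hm2 h.2.1),
            if_neg (by rintro (h | h); exacts [hA h, hm2 h.2])]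
    · rw [if_neg hi2, hinner j hjN]
      by_cases hA : i < arr1.length ∧ (pvMakebinary n arr1[i]!).getD j ' ' = '1'
      · rw [if_pos hA, if_pos (Or.inl hA)]
      · rw [if_neg hA, if_neg (by rintro (h | h); exacts [hA h, hi2 h.1])]
  -- B's row numbers and their bounds
  rw [getD_append_replicate, getD_append_replicate]
  set a1 : Int := arr1.getD i 0 with ha1
  set a2 : Int := arr2.getD i 0 with ha2
  have hm1 : 0 ≤ a1 ∧ a1 < 2 ^ N := by
    by_cases hi1 : i < arr1.length
    · rw [ha1, List.getD_eq_getElem _ _ hi1]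
      exact hbnd1 _ (List.getElem_mem _)
    · rw [ha1, List.getD_eq_default _ _ (by omega)]
      exact ⟨le_refl 0, by positivity⟩
  have hm2 : 0 ≤ a2 ∧ a2 < 2 ^ N := by
    by_cases hi2 : i < arr2.length
    · rw [ha2, List.getD_eq_getElem _ _ hi2]
      exact hbnd2 _ (List.getElem_mem _)
    · rw [ha2, List.getD_eq_default _ _ (by omega)]
      exact ⟨le_refl 0, by positivity⟩
  -- compare character by character
  apply congrArg String.ofList
  apply List.ext_getElem
  · rw [hrowlen']
    simp
  intro j hjA hjB
  have hjN : j < N := by simpa using hjB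
  rw [← List.getD_eq_getElem _ ' ' hjA, hcell j hjN]
  simp only [List.getElem_map, List.getElem_range]
  -- reduce both sides to a bit of a1 / a2
  have hsh : (n - 1 - (j : Int)).toNat = N - 1 - j := by omega
  obtain ⟨x, hx⟩ := Int.eq_ofNat_of_zero_le hm1.1
  obtain ⟨y, hy⟩ := Int.eq_ofNat_of_zero_le hm2.1
  have hB := cellB_eq x y (N - 1 - j)
  have hs1 : (i < arr1.length ∧ (pvMakebinary n arr1[i]!).getD j ' ' = '1')
      ↔ x.testBit (N - 1 - j) := by
    by_cases hi1 : i < arr1.length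
    · have he : arr1[i]! = a1 := by
        rw [ha1, List.getElem!_eq_getElem?_getD, List.getElem?_eq_getElem hi1,
          List.getD_eq_getElem _ _ hi1]
        rfl
      rw [he, pvMakebinary_getD n a1 j (by omega) hm1.1 (by simpa only [hNdef] using hm1.2)]
      rw [hx]
      simp only [Int.toNat_natCast, hNdef.symm, hi1, true_and]
      by_cases hb' : x.testBit (N - 1 - j) <;> simp [hb']
    · have hx0 : x = 0 := by
        have : a1 = 0 := by rw [ha1]; exact List.getD_eq_default _ _ (by omega)
        omega
      simp [hi1, hx0]
  have hs2 : (i < arr2.length ∧ (pvMakebinary n arr2[i]!).getD j ' ' = '1')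
      ↔ y.testBit (N - 1 - j) := by
    by_cases hi2 : i < arr2.length
    · have he : arr2[i]! = a2 := by
        rw [ha2, List.getElem!_eq_getElem?_getD, List.getElem?_eq_getElem hi2,
          List.getD_eq_getElem _ _ hi2]
        rfl
      rw [he, pvMakebinary_getD n a2 j (by omega) hm2.1 (by simpa only [hNdef] using hm2.2)]
      rw [hy]
      simp only [Int.toNat_natCast, hNdef.symm, hi2, true_and]
      by_cases hb' : y.testBit (N - 1 - j) <;> simp [hb']
    · have hy0 : y = 0 := by
        have : a2 = 0 := by rw [ha2]; exact List.getD_eq_default _ _ (by omega)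
        omega
      simp [hi2, hy0]
  rw [hsh, hx, hy]
  have hcond : ((i < arr1.length ∧ (pvMakebinary n arr1[i]!).getD j ' ' = '1')
      ∨ (i < arr2.length ∧ (pvMakebinary n arr2[i]!).getD j ' ' = '1'))
      ↔ (Int.land (Int.shiftRight (Int.lor ((x : Int)) ((y : Int))) (N - 1 - j)) 1 ≠ 0) := by
    rw [hs1, hs2, hB, Nat.testBit_or, Bool.or_eq_true]
  by_cases hc : (i < arr1.length ∧ (pvMakebinary n arr1[i]!).getD j ' ' = '1')
      ∨ (i < arr2.length ∧ (pvMakebinary n arr2[i]!).getD j ' ' = '1')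
  · rw [if_pos hc, if_pos (hcond.mp hc)]
  · rw [if_neg hc, if_neg (fun h => hc (hcond.mpr h))]
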